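-- pv_equiv track=rewrite | github.com/edoardottt/programming-fundamentals | Workbook/Strings/Strings_10/program.py | es77
-- ===== SOURCE A (Python) =====
-- def es77(parola):
--     '''
--     Si definisca la funzione NON ricorsiva e che NON faccia uso di funzioni ricorsive
--     es77(parola), che presa in input una stringa di caratteri  parola restituisce la lista dei
--     suffissi di parola. Gli elementi della lista devono risultare ordinati per lunghezza crescente.
--     Si ricorda che un suffisso di una parola e' quello che si ottiene concellando 0 o piu'
--     caratteri iniziali della parola.
--     Ad esempio per es77("fondamenti") la lista restituita sara'
--     ['i', 'ti', 'nti', 'enti', 'menti', 'amenti', 'damenti', 'ndamenti', 'ondamenti', 'fondamenti']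
--     '''
--     lista = []
--     for i in range(len(parola)):
--         lista.append(parola[i:])
--     diz = {}
--     for elem in lista:
--         if len(elem) not in lista: diz[len(elem)] = [elem]
--         else: diz[len(elem)].append(elem)
--     result = []
--     for elem in list(sorted(diz.keys())):
--         result.extend(diz[elem])
--     return result
-- ===== SOURCE B (Python) =====
-- def es77(parola):
--     result = []
--     for i in range(len(parola) - 1, -1, -1):
--         result.append(parola[i:])
--     return result
-- ===== Notes on version B (the rewrite author's own statement) =====
-- stated objective: faster
-- what changed: B emits the suffixes directly in increasing-length order by one countdown loop over start indices, removing A's intermediate list, per-element list-membership scan, length-keyed dict grouping and key sort.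
import Mathlib
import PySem

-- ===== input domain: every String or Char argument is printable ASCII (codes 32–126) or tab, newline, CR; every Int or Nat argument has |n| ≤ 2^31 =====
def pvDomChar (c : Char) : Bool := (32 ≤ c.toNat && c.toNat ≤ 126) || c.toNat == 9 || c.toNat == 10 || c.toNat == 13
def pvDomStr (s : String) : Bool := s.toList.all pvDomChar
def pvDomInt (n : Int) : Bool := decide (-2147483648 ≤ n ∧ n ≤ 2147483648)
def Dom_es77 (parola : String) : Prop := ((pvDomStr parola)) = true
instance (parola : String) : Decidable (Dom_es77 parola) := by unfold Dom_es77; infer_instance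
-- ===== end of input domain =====

-- B replaces A's list→dict-by-length→sorted-keys→extend pipeline by one countdown loop
-- that appends the suffixes directly in increasing-length order (objective: faster, measured).

-- ===== PORT A =====
def es77 (parola : String) : List String :=
  let cs := parola.toList
  let n : Int := cs.length
  let lista : List String :=
    (PySem.List.pyRange 0 n 1).foldl
      (fun acc i => acc ++ [String.ofList (PySem.List.slice cs (some i) none)]) []
  let diz : PySem.Dict Int (List String) :=
    lista.foldl
      (fun d elem =>
        -- Python's `len(elem) not in lista` tests an int for membership in a list of
        -- strings: int == str is always False in Python, so membership is always False
        -- and the condition always True; ported as the same cross-type membership scan.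
        if !(lista.any (fun _ => false)) then d.insert (PySem.Str.len elem) [elem]
        else
          -- `diz[len(elem)].append(elem)` (unreachable; would raise KeyError if key absent)
          match d.get? (PySem.Str.len elem) with
          | some v => d.insert (PySem.Str.len elem) (v ++ [elem])
          | none => d)
      PySem.Dict.empty
  (PySem.List.sorted diz.keys (fun x => x) false).foldl
    (fun res k => res ++ diz.getD k []) []

-- ===== PORT B =====
def es77_alt (parola : String) : List String :=
  let cs := parola.toList
  (PySem.List.pyRange ((cs.length : Int) - 1) (-1) (-1)).foldl
    (fun res i => res ++ [String.ofList (PySem.List.slice cs (some i) none)]) []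

-- ===== PRECONDITION & SPEC =====
def Spec_es77 (parola : String) (out : List String) : Prop := out = es77_alt parola
instance (parola : String) (out : List String) : Decidable (Spec_es77 parola out) := by unfold Spec_es77; infer_instance

-- ===== CLAIM (what is proved, stated in full; the proofs are below) =====
def Claim_equal_es77 : Prop := ∀ (parola : String), Dom_es77 parola → Spec_es77 parola (es77 parola)

-- ===== LEMMAS AND PROOFS =====

theorem es77_eq_alt (parola : String) : es77 parola = es77_alt parola := by
  unfold es77 es77_alt
  simp only []
  set cs := parola.toList with hcs
  set n : Int := (cs.length : Int) with hn
  set suf : Int → String := fun i => String.ofList (PySem.List.slice cs (some i) none) with hsuf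
  have hlista : (PySem.List.pyRange 0 n 1).foldl (fun acc i => acc ++ [suf i]) [] =
      (PySem.List.pyRange 0 n 1).map suf := by
    simpa using PySem.List.foldl_append_singleton_eq_map suf (PySem.List.pyRange 0 n 1) []
  rw [hlista]
  set rng := PySem.List.pyRange 0 n 1 with hrng
  have hlen : ∀ i ∈ rng, PySem.Str.len (suf i) = n - i := by
    intro i hi
    rw [hrng, PySem.List.mem_pyRange_one] at hi
    rw [hsuf]
    simp only [PySem.Str.len_eq, String.toList_ofList, PySem.List.slice_from cs hi.1,
      List.length_drop]
    omega
  -- rewrite the if-fold to a plain insert-fold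
  have hfun : (fun (d : PySem.Dict Int (List String)) elem =>
      if !((rng.map suf).any (fun _ => false)) then d.insert (PySem.Str.len elem) [elem]
      else
        match d.get? (PySem.Str.len elem) with
        | some v => d.insert (PySem.Str.len elem) (v ++ [elem])
        | none => d) =
      (fun d elem => d.insert (PySem.Str.len elem) [elem]) := by
    funext d elem; simp
  rw [hfun]
  set diz := (rng.map suf).foldl (fun d elem => d.insert (PySem.Str.len elem) [elem]) PySem.Dict.empty with hdiz
  have hmapnodup : ((rng.map suf).map PySem.Str.len).Nodup := by
    rw [List.map_map]
    rw [List.map_congr_left (f := PySem.Str.len ∘ suf) (fun i hi => (hlen i hi : (PySem.Str.len ∘ suf) i = n - i))]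
    exact (PySem.List.nodup_pyRange_one 0 n).map (fun a b h => by omega)
  have hitems : diz.items = rng.map (fun i => (n - i, [suf i])) := by
    rw [hdiz, PySem.Dict.items_foldl_insert_fresh (rng.map suf) PySem.Str.len (fun e => [e])
      PySem.Dict.empty (fun a _ => by simp) hmapnodup]
    simp only [PySem.Dict.empty, List.nil_append, List.map_map]
    exact List.map_congr_left (fun i hi => by
      simp only [Function.comp_apply]
      rw [hlen i hi])
  have hkeys : diz.keys = rng.map (fun i => n - i) := by
    simp only [PySem.Dict.keys, hitems, List.map_map]
    rfl
  have hkeysnodup : diz.keys.Nodup := by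
    rw [hkeys]
    exact (PySem.List.nodup_pyRange_one 0 n).map (fun a b h => by omega)
  have hsorted : PySem.List.sorted diz.keys (fun x => x) false = diz.keys.reverse := by
    apply PySem.List.sorted_eq_of_perm_of_pairwise_lt _ _ _ (List.reverse_perm _)
    rw [List.pairwise_reverse, hkeys, List.pairwise_map]
    exact (PySem.List.pairwise_lt_pyRange_one 0 n).imp (fun h => by omega)
  rw [hsorted, hkeys, ← List.map_reverse]
  have hfold2 : ((rng.reverse.map (fun i => n - i)).foldl (fun res k => res ++ diz.getD k []) []) =
      (rng.reverse.map (fun i => n - i)).flatMap (fun k => diz.getD k []) := by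
    exact (PySem.List.foldl_append_eq_flatMap (fun k => diz.getD k []) _ []).trans
      (List.nil_append _)
  rw [hfold2, List.flatMap_map]
  have hget : ∀ i ∈ rng.reverse, diz.getD (n - i) [] = [suf i] := by
    intro i hi
    rw [List.mem_reverse] at hi
    exact PySem.Dict.getD_of_mem_items diz
      (by rw [hitems]; exact List.mem_map_of_mem hi) hkeysnodup []
  have hflat : rng.reverse.flatMap (fun i => diz.getD (n - i) []) = rng.reverse.map suf := by
    rw [List.map_eq_flatMap]
    exact List.flatMap_congr (fun i hi => hget i hi)
  rw [hflat]
  -- B side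
  have hB : PySem.List.pyRange (n - 1) (-1) (-1) = rng.reverse := by
    rw [PySem.List.pyRange_neg_one_eq_reverse, hrng]
    norm_num
  rw [hB]
  exact ((PySem.List.foldl_append_singleton_eq_map suf rng.reverse []).trans
    (List.nil_append _)).symm

-- ===== VERDICT (by name: the statement is the Claim_ definition above) =====
theorem es77_spec : Claim_equal_es77 := by
  intro parola _
  exact es77_eq_alt parola
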